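-- pv_equiv track=rewrite | github.com/kirpastuhov/PADS | OpenEDU/Week 9/week9_lab2.py | calculate_sum_distance
-- ===== SOURCE A (Python) =====
-- def calculate_sum_distance(positions):
--     k = len(positions) - 1
--
--     sum = 0
--     for p in reversed(positions):
--         sum += k * p
--         k -= 2
--
--     for i in range(1, len(positions)):
--         sum -= i
--     return sum
-- ===== SOURCE B (Python) =====
-- def calculate_sum_distance(positions):
--     n = len(positions)
--     total = 0
--     for k, (a, b) in enumerate(zip(positions, positions[1:])):
--         total += (b - a) * (k + 1) * (n - 1 - k)
--     return total - n * (n - 1) // 2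
-- ===== Notes on version B (the rewrite author's own statement) =====
-- stated objective: alternative
-- what changed: B sums over consecutive gaps: each gap positions[k+1]-positions[k] is weighted by its crossing count (k+1)*(n-1-k) (the number of ordered pairs that span it), instead of A's per-element moving coefficient stepping by -2 over the reversed list; the final decrement loop becomes the closed-form triangular number n*(n-1)//2.
import Mathlib
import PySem

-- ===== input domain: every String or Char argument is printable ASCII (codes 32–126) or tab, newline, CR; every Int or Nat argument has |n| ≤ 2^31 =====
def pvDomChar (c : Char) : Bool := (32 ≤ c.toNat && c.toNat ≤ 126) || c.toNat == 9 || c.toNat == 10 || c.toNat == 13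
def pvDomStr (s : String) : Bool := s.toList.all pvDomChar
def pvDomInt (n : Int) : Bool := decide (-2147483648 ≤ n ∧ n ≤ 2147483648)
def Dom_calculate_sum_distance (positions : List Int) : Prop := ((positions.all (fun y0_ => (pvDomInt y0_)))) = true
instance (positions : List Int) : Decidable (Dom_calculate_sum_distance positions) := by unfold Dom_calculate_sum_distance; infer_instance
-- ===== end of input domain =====

-- B sums over consecutive gaps, weighting each gap by its crossing count (k+1)*(n-1-k),
-- instead of A's moving per-element coefficient over the reversed list plus a decrement loop (alternative).

-- ===== PORT A =====
def calculate_sum_distance (positions : List Int) : Int :=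
  let k : Int := (positions.length : Int) - 1
  -- for p in reversed(positions): sum += k * p; k -= 2
  let st : Int × Int := positions.reverse.foldl
    (fun (st : Int × Int) (p : Int) => (st.1 + st.2 * p, st.2 - 2)) (0, k)
  -- for i in range(1, len(positions)): sum -= i
  (PySem.List.pyRange 1 (positions.length : Int) 1).foldl (fun s i => s - i) st.1

-- ===== PORT B =====
def calculate_sum_distance_alt (positions : List Int) : Int :=
  let n : Int := (positions.length : Int)
  -- for k, (a, b) in enumerate(zip(positions, positions[1:])): total += (b-a)*(k+1)*(n-1-k)
  let total : Int := (PySem.List.enumerate (positions.zip (PySem.List.slice positions (some 1) none)) 0).foldl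
    (fun (t : Int) (kab : Int × (Int × Int)) =>
      t + (kab.2.2 - kab.2.1) * (kab.1 + 1) * (n - 1 - kab.1)) 0
  total - PySem.Int.floordiv (n * (n - 1)) 2

-- ===== PRECONDITION & SPEC =====
def Spec_calculate_sum_distance (positions : List Int) (out : Int) : Prop := out = calculate_sum_distance_alt positions
instance (positions : List Int) (out : Int) : Decidable (Spec_calculate_sum_distance positions out) := by unfold Spec_calculate_sum_distance; infer_instance

-- ===== CLAIM (what is proved, stated in full; the proofs are below) =====
def Claim_equal_calculate_sum_distance : Prop := ∀ (positions : List Int), Dom_calculate_sum_distance positions → Spec_calculate_sum_distance positions (calculate_sum_distance positions)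

-- ===== LEMMAS AND PROOFS =====

def pvPsum : List Int → Int
  | [] => 0
  | p :: l => p + pvPsum l

def pvWsum : Int → List Int → Int
  | _, [] => 0
  | m, p :: l => m * p + pvWsum (m + 1) l

-- sum over ordered pairs i < j of (p_j - p_i)
def pvPairSum : List Int → Int
  | [] => 0
  | p :: l => (pvPsum l - (l.length : Int) * p) + pvPairSum l

-- B's gap sum, recursively: gap coefficient (m+1)*(n-1-m)
def pvGsum (n : Int) : Int → List Int → Int
  | _, [] => 0
  | _, [_] => 0
  | m, p :: q :: rest => (q - p) * (m + 1) * (n - 1 - m) + pvGsum n (m + 1) (q :: rest)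

theorem pvWsum_succ (m : Int) (l : List Int) :
    pvWsum (m + 1) l = pvWsum m l + pvPsum l := by
  induction l generalizing m with
  | nil => simp [pvWsum, pvPsum]
  | cons p l ih => simp [pvWsum, pvPsum, ih]; ring

-- A's weighted sum equals the ordered-pair sum
theorem pvA_eq_pair (l : List Int) :
    2 * pvWsum 0 l - ((l.length : Int) - 1) * pvPsum l = pvPairSum l := by
  induction l with
  | nil => simp [pvWsum, pvPsum, pvPairSum]
  | cons p l ih =>
      have h1 : pvWsum (0 + 1) l = pvWsum 0 l + pvPsum l := pvWsum_succ 0 l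
      simp only [pvWsum, pvPsum, pvPairSum, List.length_cons]
      rw [← ih]
      norm_num at h1 ⊢
      rw [h1]
      ring

-- B's fold equals the recursive gap sum
theorem pvBfold (n : Int) (l : List Int) : ∀ (m t : Int),
    (PySem.List.enumerate (l.zip l.tail) m).foldl
      (fun (t : Int) (kab : Int × (Int × Int)) =>
        t + (kab.2.2 - kab.2.1) * (kab.1 + 1) * (n - 1 - kab.1)) t
    = t + pvGsum n m l := by
  induction l with
  | nil => intro m t; simp [pvGsum, PySem.List.enumerate_nil]
  | cons p l ih =>
      intro m t
      cases l with
      | nil => simp [pvGsum, PySem.List.enumerate_nil]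
      | cons q rest =>
          simp only [List.tail_cons, List.zip_cons_cons, PySem.List.enumerate_cons,
            List.foldl_cons]
          have := ih (m + 1) (t + (q - p) * (m + 1) * (n - 1 - m))
          simp only [List.tail_cons] at this
          rw [this]
          simp only [pvGsum]
          ring

-- gap-sum closed form: with n = m + length, it is the pair sum plus corrections
theorem pvGsum_closed (l : List Int) : ∀ (m : Int),
    pvGsum (m + (l.length : Int)) m l
      = pvPairSum l + m * pvPsum l - m * (l.length : Int) * (l.headD 0) := by
  induction l with
  | nil => intro m; simp [pvGsum, pvPairSum, pvPsum]
  | cons p l ih =>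
      intro m
      cases l with
      | nil => simp [pvGsum, pvPairSum, pvPsum]
      | cons q rest =>
          have h := ih (m + 1)
          simp only [pvGsum, pvPairSum, pvPsum, List.length_cons, List.headD_cons] at h ⊢
          push_cast at h ⊢
          rw [show m + ((rest.length : Int) + 1 + 1) - 1 - m = (rest.length : Int) + 1 by ring,
              show m + ((rest.length : Int) + 1 + 1) = (m + 1) + ((rest.length : Int) + 1) by ring,
              h]
          ring

-- A's first loop (reversed, moving coefficient)
theorem pvAfold (l : List Int) : ∀ (s k : Int),
    l.foldr (fun (p : Int) (st : Int × Int) => (st.1 + st.2 * p, st.2 - 2)) (s, k)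
    = (s + (k - 2 * ((l.length : Int) - 1)) * pvPsum l + 2 * pvWsum 0 l,
       k - 2 * (l.length : Int)) := by
  induction l with
  | nil => intro s k; simp [pvPsum, pvWsum]
  | cons p l ih =>
      intro s k
      simp only [List.foldr_cons, ih]
      have h1 : pvWsum (0 + 1) l = pvWsum 0 l + pvPsum l := pvWsum_succ 0 l
      norm_num at h1
      simp [pvPsum, pvWsum, h1]
      constructor <;> ring

-- A's second loop subtracts the triangular number
theorem pvSubloop (n : Nat) : ∀ (s : Int),
    (PySem.List.pyRange 1 (n : Int) 1).foldl (fun s i => s - i) s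
    = s - PySem.Int.floordiv ((n : Int) * ((n : Int) - 1)) 2 := by
  induction n with
  | zero =>
      intro s
      rw [PySem.List.pyRange_one_eq_nil (by norm_num)]
      rw [PySem.Int.floordiv_eq_ediv_of_pos (by norm_num)]
      norm_num
  | succ n ih =>
      intro s
      rcases Nat.eq_zero_or_pos n with h0 | hpos
      · subst h0
        rw [show ((1 : Nat) : Int) = 1 by norm_num,
            PySem.List.pyRange_one_eq_nil (by norm_num)]
        rw [PySem.Int.floordiv_eq_ediv_of_pos (by norm_num)]
        norm_num
      · have hc : ((n + 1 : Nat) : Int) = (n : Int) + 1 := by push_cast; ring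
        rw [hc, PySem.List.pyRange_one_succ_right (by exact_mod_cast hpos),
            List.foldl_append, ih s]
        simp only [List.foldl_cons, List.foldl_nil]
        rw [PySem.Int.floordiv_eq_ediv_of_pos (by norm_num),
            PySem.Int.floordiv_eq_ediv_of_pos (by norm_num)]
        have hmul : ((n : Int) + 1) * ((n : Int) + 1 - 1)
            = (n : Int) * ((n : Int) - 1) + (n : Int) * 2 := by ring
        rw [hmul, Int.add_mul_ediv_right _ _ (by norm_num : (2:Int) ≠ 0)]
        ring

-- ===== VERDICT (by name: the statement is the Claim_ definition above) =====
theorem calculate_sum_distance_spec : Claim_equal_calculate_sum_distance := by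
  intro positions _
  unfold Spec_calculate_sum_distance calculate_sum_distance calculate_sum_distance_alt
  simp only [List.foldl_reverse, PySem.List.slice_from_one]
  rw [pvAfold, pvSubloop positions.length, pvBfold]
  have h := pvGsum_closed positions 0
  norm_num at h
  rw [h, ← pvA_eq_pair]
  ring
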